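-- pv_equiv track=rewrite | github.com/christianebacani/Roadmap | Coding Challenges using Python and SQL/Code Wars Python Solved Problems/6 Kyu/coding_meetup_number_8_higher_order_functions_series_will_all_continents_be_represented.py | all_continents
-- ===== SOURCE A (Python) =====
-- def all_continents(lst: list[dict[str, str]]) -> bool:
--     continents = ['Africa', 'Americas', 'Asia', 'Europe', 'Oceania']
--
--     for i in range(len(continents)):
--         continents_of_developers_who_will_attend = []
--
--         for j in range(len(lst)):
--             continents_of_developers_who_will_attend.append(lst[j]['continent'])
--
--         if continents[i] not in continents_of_developers_who_will_attend:
--             return False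
--
--     return True
-- ===== SOURCE B (Python) =====
-- def all_continents(lst: list[dict[str, str]]) -> bool:
--     devs = {d['continent'] for d in lst}
--     return all(c in devs for c in ['Africa', 'Americas', 'Asia', 'Europe', 'Oceania'])
-- ===== Notes on version B (the rewrite author's own statement) =====
-- stated objective: simpler
-- what changed: Replaces the per-continent full rescans of the list (rebuilding the continent list five times) with one set built in a single pass followed by five membership checks.
import Mathlib
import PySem

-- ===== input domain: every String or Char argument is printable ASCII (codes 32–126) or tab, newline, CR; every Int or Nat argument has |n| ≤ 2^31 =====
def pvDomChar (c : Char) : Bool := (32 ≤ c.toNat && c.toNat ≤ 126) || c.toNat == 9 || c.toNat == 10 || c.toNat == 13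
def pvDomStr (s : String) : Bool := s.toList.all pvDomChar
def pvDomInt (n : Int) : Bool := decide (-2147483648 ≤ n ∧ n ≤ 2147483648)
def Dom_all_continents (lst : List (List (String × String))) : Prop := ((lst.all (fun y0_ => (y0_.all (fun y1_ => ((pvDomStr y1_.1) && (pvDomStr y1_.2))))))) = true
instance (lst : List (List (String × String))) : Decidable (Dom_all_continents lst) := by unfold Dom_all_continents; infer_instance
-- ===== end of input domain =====

-- B builds the set of attendees' continents once and does five membership checks,
-- instead of A's per-continent full rescan of the list; return values agree on Pre_.


-- ===== PORT A =====
-- d['continent'] is (Dict.get? …).getD ""; exact under Pre_ (the key is present).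
def contLookup (d : List (String × String)) : String :=
  ((PySem.Dict.mk d).get? "continent").getD ""

-- inner loop: for j in range(len(lst)): append lst[j]['continent']
def attendA (lst : List (List (String × String))) : List String :=
  lst.foldl (fun acc d => acc ++ [contLookup d]) []

-- outer loop over the continents list, with early return False
def goA (lst : List (List (String × String))) : List String → Bool
  | [] => true
  | c :: cs =>
      let attend := attendA lst
      if attend.contains c then goA lst cs else false

def all_continents (lst : List (List (String × String))) : Bool :=
  goA lst ["Africa", "Americas", "Asia", "Europe", "Oceania"]

-- ===== PORT B =====
def all_continents_alt (lst : List (List (String × String))) : Bool :=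
  let devs : PySem.Set String := PySem.Set.ofList (lst.map contLookup)
  (["Africa", "Americas", "Asia", "Europe", "Oceania"]).all (fun c => PySem.Set.contains devs c)

-- ===== PRECONDITION & SPEC =====
-- A (and B) raise KeyError when some dict in lst lacks the key 'continent'; Pre_ excludes exactly those inputs.
def Pre_all_continents (lst : List (List (String × String))) : Prop :=
  ∀ d ∈ lst, "continent" ∈ d.map Prod.fst
instance (lst : List (List (String × String))) : Decidable (Pre_all_continents lst) := by unfold Pre_all_continents; infer_instance

def pvWitness_all_continents : (List (List (String × String))) :=
  [[("continent", "Asia")], [("continent", "Europe")]]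

def Spec_all_continents (lst : List (List (String × String))) (out : Bool) : Prop := out = all_continents_alt lst
instance (lst : List (List (String × String))) (out : Bool) : Decidable (Spec_all_continents lst out) := by unfold Spec_all_continents; infer_instance

-- ===== CLAIM (what is proved, stated in full; the proofs are below) =====
def Claim_equal_all_continents : Prop := ∀ (lst : List (List (String × String))), Dom_all_continents lst → Pre_all_continents lst → Spec_all_continents lst (all_continents lst)

-- ===== LEMMAS AND PROOFS =====
theorem attendA_eq_map (lst : List (List (String × String))) :
    attendA lst = lst.map contLookup := by
  unfold attendA
  rw [PySem.List.foldl_append_eq_flatMap]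
  induction lst with
  | nil => rfl
  | cons d ds ih => simp only [List.nil_append] at ih ⊢; rw [List.flatMap_cons, ih]; rfl

theorem goA_eq_all (lst : List (List (String × String))) (cs : List String) :
    goA lst cs = cs.all (fun c => (attendA lst).contains c) := by
  induction cs with
  | nil => rfl
  | cons c cs ih =>
      simp only [goA, List.all_cons, ih]
      by_cases h : (attendA lst).contains c <;> simp

theorem contains_ofList (xs : List String) (c : String) :
    PySem.Set.contains (PySem.Set.ofList xs) c = xs.contains c := by
  simp only [PySem.Set.contains]
  rcases h : xs.contains c with _ | _
  · simp only [List.contains_eq_mem, decide_eq_false_iff_not] at h ⊢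
    simpa [PySem.Set.mem_ofList] using h
  · simp only [List.contains_eq_mem, decide_eq_true_eq] at h ⊢
    simpa [PySem.Set.mem_ofList] using h

-- ===== VERDICT (by name: the statement is the Claim_ definition above) =====
theorem all_continents_spec : Claim_equal_all_continents := by
  intro lst _ _
  unfold Spec_all_continents all_continents all_continents_alt
  rw [goA_eq_all]
  simp only [contains_ofList, attendA_eq_map]
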